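-- pv_equiv track=rewrite | github.com/AnaMarks/Listas-Python | Python/lista13e14.py | x_antes
-- ===== SOURCE A (Python) =====
-- def x_antes(words):
--   x = []
--   outros = []
--   for w in words:
--     if w.startswith('x'): #w[0] == 'x'
--       x.append(w)
--     else:
--       outros.append(w)
--   return sorted(x) + sorted(outros)
-- ===== SOURCE B (Python) =====
-- def x_antes(words):
--   return sorted(words, key=lambda w: (not w.startswith('x'), w))
-- ===== Notes on version B (the rewrite author's own statement) =====
-- stated objective: idiomatic
-- what changed: Replaces the explicit partition loop plus two separate sorts with one stable sorted() call over the whole input using the compound key (not w.startswith('x'), w).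
import Mathlib
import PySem

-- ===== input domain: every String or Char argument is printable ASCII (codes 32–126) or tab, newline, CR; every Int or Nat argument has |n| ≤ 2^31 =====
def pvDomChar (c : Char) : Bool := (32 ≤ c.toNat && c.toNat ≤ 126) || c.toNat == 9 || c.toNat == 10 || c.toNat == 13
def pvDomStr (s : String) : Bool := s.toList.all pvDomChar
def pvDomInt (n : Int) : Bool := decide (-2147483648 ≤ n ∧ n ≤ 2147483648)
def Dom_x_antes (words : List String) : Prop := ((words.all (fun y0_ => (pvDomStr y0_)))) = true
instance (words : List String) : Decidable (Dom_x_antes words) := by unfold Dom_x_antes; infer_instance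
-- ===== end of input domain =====

-- B replaces A's partition-then-two-sorts with one stable keyed sort (idiomatic; same asymptotic cost).

-- ===== PORT A =====
-- partition loop: append w to x or outros, then sorted(x) + sorted(outros)
def x_antes (words : List String) : List String :=
  let p := words.foldl
    (fun (acc : List String × List String) w =>
      if PySem.Str.startswith w "x" then (acc.1 ++ [w], acc.2) else (acc.1, acc.2 ++ [w]))
    ([], [])
  PySem.List.sorted p.1 (fun w => w) ++ PySem.List.sorted p.2 (fun w => w)

-- ===== PORT B =====
-- one sorted() with compound key (not w.startswith('x'), w); Python's bool key False/True is ported as Int 0/1, which compares identically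
def x_antes_alt (words : List String) : List String :=
  PySem.List.sorted2 words (fun w => if PySem.Str.startswith w "x" then (0 : Int) else 1) (fun w => w)

-- ===== PRECONDITION & SPEC =====
def Spec_x_antes (words : List String) (out : List String) : Prop := out = x_antes_alt words
instance (words : List String) (out : List String) : Decidable (Spec_x_antes words out) := by unfold Spec_x_antes; infer_instance

-- ===== CLAIM (what is proved, stated in full; the proofs are below) =====
def Claim_equal_x_antes : Prop := ∀ (words : List String), Dom_x_antes words → Spec_x_antes words (x_antes words)

-- ===== LEMMAS AND PROOFS =====

-- abbreviations used only by the proofs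
def pvP (w : String) : Bool := PySem.Str.startswith w "x"
def pvK1 (w : String) : Int := if pvP w then 0 else 1
-- comparison used by B's lexicographic sort (exactly sorted2's `lt`)
def pvLtL (a b : String) : Bool :=
  decide (pvK1 a < pvK1 b) || (!decide (pvK1 b < pvK1 a) && decide (a < b))
-- plain string comparison used by A's two sorts
def pvLtS (a b : String) : Bool := decide (a < b)

theorem pvLtL_eq_of_same (a b : String) (h : pvP a = pvP b) : pvLtL a b = pvLtS a b := by
  cases hb : pvP b <;> simp [pvLtL, pvLtS, pvK1, h, hb]

theorem pvLtL_true (a b : String) (ha : pvP a = true) (hb : pvP b = false) : pvLtL a b = true := by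
  simp [pvLtL, pvK1, ha, hb]

theorem pvLtL_false (a b : String) (ha : pvP a = false) (hb : pvP b = true) : pvLtL a b = false := by
  simp [pvLtL, pvK1, ha, hb]

-- inserting an x-word into (x-block ++ other-block) stays in the x-block
theorem insert_left (x : String) (hx : pvP x = true) :
    ∀ (L1 L2 : List String), (∀ y ∈ L1, pvP y = true) → (∀ y ∈ L2, pvP y = false) →
    PySem.List.insertBy pvLtL x (L1 ++ L2) = PySem.List.insertBy pvLtS x L1 ++ L2 := by
  intro L1
  induction L1 with
  | nil =>
      intro L2 _ h2
      cases L2 with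
      | nil => rfl
      | cons c cs =>
          simp [PySem.List.insertBy, pvLtL_true x c hx (h2 c (by simp))]
  | cons y ys ih =>
      intro L2 h1 h2
      have hy : pvP y = true := h1 y (by simp)
      have hlt : pvLtL x y = pvLtS x y := pvLtL_eq_of_same x y (hx.trans hy.symm)
      by_cases h : pvLtS x y = true
      · simp [PySem.List.insertBy, hlt, h]
      · simp only [List.cons_append, PySem.List.insertBy, hlt]
        rw [if_neg h, if_neg h]
        simp [ih L2 (fun z hz => h1 z (by simp [hz])) h2]

-- inserting a non-x-word into (x-block ++ other-block) skips the x-block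
theorem insert_right (x : String) (hx : pvP x = false) :
    ∀ (L1 L2 : List String), (∀ y ∈ L1, pvP y = true) → (∀ y ∈ L2, pvP y = false) →
    PySem.List.insertBy pvLtL x (L1 ++ L2) = L1 ++ PySem.List.insertBy pvLtS x L2 := by
  intro L1
  induction L1 with
  | nil =>
      intro L2 _ h2
      induction L2 with
      | nil => rfl
      | cons c cs ihc =>
          have hc : pvP c = false := h2 c (by simp)
          have hlt : pvLtL x c = pvLtS x c := pvLtL_eq_of_same x c (hx.trans hc.symm)
          by_cases h : pvLtS x c = true
          · simp [PySem.List.insertBy, hlt, h]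
          · simp only [List.nil_append, PySem.List.insertBy, hlt]
            rw [if_neg (by simpa using h), if_neg (by simpa using h)]
            simpa using ihc (fun z hz => h2 z (by simp [hz]))
  | cons y ys ih =>
      intro L2 h1 h2
      have hy : pvP y = true := h1 y (by simp)
      simp only [List.cons_append, PySem.List.insertBy]
      rw [if_neg (by simp [pvLtL_false x y hx hy])]
      simp [ih L2 (fun z hz => h1 z (by simp [hz])) h2]

-- main invariant: B's single lexicographic fold over ws, started from an x-block ++ other-block,
-- equals A's two plain folds over the two filtered halves
theorem fold_split : ∀ (ws X O : List String),
    (∀ y ∈ X, pvP y = true) → (∀ y ∈ O, pvP y = false) →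
    ws.foldl (fun acc w => PySem.List.insertBy pvLtL w acc) (X ++ O) =
      (ws.filter pvP).foldl (fun acc w => PySem.List.insertBy pvLtS w acc) X ++
      (ws.filter (fun w => !pvP w)).foldl (fun acc w => PySem.List.insertBy pvLtS w acc) O := by
  intro ws
  induction ws with
  | nil => intro X O _ _; rfl
  | cons w ws ih =>
      intro X O hX hO
      by_cases h : pvP w = true
      · simp only [List.foldl_cons, List.filter_cons, h, Bool.not_true, if_true]
        rw [insert_left w h X O hX hO]
        exact ih _ O (fun z hz => by
          rcases (PySem.List.mem_insertBy pvLtS w z X).1 hz with rfl | hz'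
          · exact h
          · exact hX z hz') hO
      · have h' : pvP w = false := by simpa using h
        simp only [List.foldl_cons, List.filter_cons, h', Bool.not_false, if_true,
          Bool.false_eq_true, if_false]
        rw [insert_right w h' X O hX hO]
        exact ih X _ hX (fun z hz => by
          rcases (PySem.List.mem_insertBy pvLtS w z O).1 hz with rfl | hz'
          · exact h'
          · exact hO z hz')

-- A's partition loop collects exactly the two filtered sublists, in order
theorem part_fold : ∀ (ws X O : List String),
    ws.foldl (fun (acc : List String × List String) w =>
        if PySem.Str.startswith w "x" then (acc.1 ++ [w], acc.2) else (acc.1, acc.2 ++ [w])) (X, O) =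
      (X ++ ws.filter pvP, O ++ ws.filter (fun w => !pvP w)) := by
  intro ws
  induction ws with
  | nil => intro X O; simp
  | cons w ws ih =>
      intro X O
      simp only [List.foldl_cons]
      rw [show PySem.Str.startswith w "x" = pvP w from rfl]
      by_cases h : pvP w = true
      · rw [if_pos h, ih, List.filter_cons, List.filter_cons]
        simp [h]
      · have h' : pvP w = false := by simpa using h
        rw [if_neg (by simp [h']), ih, List.filter_cons, List.filter_cons]
        simp [h']

-- ===== VERDICT (by name: the statement is the Claim_ definition above) =====
theorem x_antes_spec : Claim_equal_x_antes := by
  intro words _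
  show x_antes words = x_antes_alt words
  have hA : x_antes words =
      PySem.List.sorted (words.filter pvP) (fun w => w) ++
      PySem.List.sorted (words.filter (fun w => !pvP w)) (fun w => w) := by
    show (PySem.List.sorted _ _ ++ PySem.List.sorted _ _ : List String) = _
    rw [part_fold words [] []]
    rfl
  have hB : x_antes_alt words =
      words.foldl (fun acc w => PySem.List.insertBy pvLtL w acc) [] := rfl
  rw [hA, hB,
    show ([] : List String) = [] ++ [] from rfl,
    fold_split words [] [] (by simp) (by simp)]
  rw [PySem.List.sorted_eq_foldl_insertBy, PySem.List.sorted_eq_foldl_insertBy]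
  rfl
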